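-- pv_equiv track=rewrite | github.com/HimanshuJo/GFGPOTDSolutions | YouAndYourBooks/YouAndYourBooks.py | max_Books
-- ===== SOURCE A (Python) =====
-- def max_Books(n, k, arr):
--
--     def checkIsAValidCondition(n, k, currentElementInArray, currentIndexWhileTraversing):
--         if currentIndexWhileTraversing>=n or currentElementInArray>k:
--             return False
--         return True
--
--     maxNumberBooksToCollect=0
--     for i in range(0, n, 1):
--         currentElementInArray=arr[i]
--         currentIndexWhileTraversing=i
--         currentMaxNumberBooksToCollect=0
--         isConsecutiveStacksOfBooksPresentForCurrentTraversal=False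
--         while(checkIsAValidCondition(n, k, currentElementInArray, currentIndexWhileTraversing)):
--             currentMaxNumberBooksToCollect+=arr[currentIndexWhileTraversing]
--             currentIndexWhileTraversing+=1
--             if currentIndexWhileTraversing>=n:
--                 break
--             currentElementInArray=arr[currentIndexWhileTraversing]
--             if isConsecutiveStacksOfBooksPresentForCurrentTraversal==False:
--                 isConsecutiveStacksOfBooksPresentForCurrentTraversal=True
--         if isConsecutiveStacksOfBooksPresentForCurrentTraversal==True:
--             i=currentIndexWhileTraversing-1
--         maxNumberBooksToCollect=max(maxNumberBooksToCollect, currentMaxNumberBooksToCollect)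
--     return maxNumberBooksToCollect
-- ===== SOURCE B (Python) =====
-- def max_Books(n, k, arr):
--     best = 0
--     cur = 0
--     for i in range(n - 1, -1, -1):
--         x = arr[i]
--         cur = 0 if x > k else x + cur
--         if cur > best:
--             best = cur
--     return best
-- ===== Notes on version B (the rewrite author's own statement) =====
-- stated objective: faster
-- what changed: Replaced the quadratic restart-a-run-at-every-index scan with a single right-to-left pass that maintains the running suffix-run sum (reset on an element > k) and its maximum.
import Mathlib
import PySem

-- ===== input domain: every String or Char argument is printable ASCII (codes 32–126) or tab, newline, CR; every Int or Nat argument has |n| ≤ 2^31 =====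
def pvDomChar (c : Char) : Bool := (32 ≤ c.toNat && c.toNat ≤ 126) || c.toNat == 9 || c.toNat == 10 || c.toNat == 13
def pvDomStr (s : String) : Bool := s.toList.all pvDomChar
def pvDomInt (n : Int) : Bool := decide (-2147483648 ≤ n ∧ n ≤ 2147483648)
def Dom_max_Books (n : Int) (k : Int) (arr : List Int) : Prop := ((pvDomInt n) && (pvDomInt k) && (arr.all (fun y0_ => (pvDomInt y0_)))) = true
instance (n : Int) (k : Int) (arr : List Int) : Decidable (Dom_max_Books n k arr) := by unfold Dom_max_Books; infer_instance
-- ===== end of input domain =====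

-- B replaces A's quadratic per-index run scan with one right-to-left pass keeping the
-- running suffix-run sum and its maximum (objective: faster, asymptotic).


-- ===== PORT A =====
-- A's inner while loop: condition 'idx < n and arr[idx] <= k', body adds arr[idx] and
-- advances.  (A's flag and its dead 'i = ...' reassignment inside the for do not affect
-- the loop variable in Python, hence are not part of the returned value and are omitted.)
-- Fuel: the index strictly increases and the loop stops at idx >= n, so n.toNat steps suffice.
def pvWhileA (n : Int) (k : Int) (arr : List Int) : Nat → Int → Int → Int
  | 0, _, cm => cm
  | fuel+1, idx, cm =>
    if idx ≥ n ∨ PySem.List.pyGetD arr idx 0 > k then cm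
    else pvWhileA n k arr fuel (idx + 1) (cm + PySem.List.pyGetD arr idx 0)

def max_Books (n : Int) (k : Int) (arr : List Int) : Int :=
  (PySem.List.pyRange 0 n 1).foldl
    (fun maxB i => max maxB (pvWhileA n k arr n.toNat i 0)) 0

-- ===== PORT B =====
def max_Books_alt (n : Int) (k : Int) (arr : List Int) : Int :=
  ((PySem.List.pyRange (n - 1) (-1) (-1)).foldl
    (fun (p : Int × Int) i =>
      let x := PySem.List.pyGetD arr i 0
      let cur := if x > k then 0 else x + p.2
      (if cur > p.1 then cur else p.1, cur)) (0, 0)).1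

-- ===== PRECONDITION & SPEC =====
-- A indexes arr[i] for every 0 ≤ i < n, so it raises IndexError when n > len(arr); Pre_ excludes exactly that.
def Pre_max_Books (n : Int) (k : Int) (arr : List Int) : Prop := n ≤ (arr.length : Int)
instance (n : Int) (k : Int) (arr : List Int) : Decidable (Pre_max_Books n k arr) := by unfold Pre_max_Books; infer_instance
def pvWitness_max_Books : Int × Int × List Int := (3, 5, [1, 7, 2])

def Spec_max_Books (n : Int) (k : Int) (arr : List Int) (out : Int) : Prop := out = max_Books_alt n k arr
instance (n : Int) (k : Int) (arr : List Int) (out : Int) : Decidable (Spec_max_Books n k arr out) := by unfold Spec_max_Books; infer_instance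

-- ===== CLAIM (what is proved, stated in full; the proofs are below) =====
def Claim_equal_max_Books : Prop := ∀ (n : Int) (k : Int) (arr : List Int), Dom_max_Books n k arr → Pre_max_Books n k arr → Spec_max_Books n k arr (max_Books n k arr)

-- ===== LEMMAS AND PROOFS =====

-- run sum from the front of a list: sum until the first element > k
def pvRS (k : Int) : List Int → Int
  | [] => 0
  | x :: t => if x > k then 0 else x + pvRS k t

-- maximum over all suffixes of the run sum (0 included)
def pvMS (k : Int) : List Int → Int
  | [] => 0
  | x :: t => max (pvMS k t) (if x > k then 0 else x + pvRS k t)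

-- a max-fold lets its seed be pulled out through max
theorem pvFoldMax_pull (g : Nat → Int) (l : List Nat) :
    ∀ a c : Int, l.foldl (fun acc j => max acc (g j)) (max a c)
      = max a (l.foldl (fun acc j => max acc (g j)) c) := by
  induction l with
  | nil => intro a c; simp
  | cons x t ih =>
    intro a c
    show t.foldl _ (max (max a c) (g x)) = max a (t.foldl _ (max c (g x)))
    rw [max_assoc]
    exact ih a (max c (g x))

-- A's outer fold of run sums, in list-structural form
theorem pvA_ref (k : Int) (xs : List Int) :
    (List.range xs.length).foldl (fun acc j => max acc (pvRS k (xs.drop j))) 0 = pvMS k xs := by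
  induction xs with
  | nil => simp [pvMS]
  | cons x t ih =>
    rw [List.length_cons, List.range_succ_eq_map]
    simp only [List.foldl_cons, List.foldl_map, Nat.succ_eq_add_one, List.drop_succ_cons,
      List.drop_zero]
    rw [max_comm 0 (pvRS k (x :: t)), pvFoldMax_pull, ih]
    show max (pvRS k (x :: t)) (pvMS k t) = pvMS k (x :: t)
    rw [max_comm]
    rfl

-- A's inner while loop computes cm plus the run sum of the remaining segment
theorem pvWhileA_eq (n k : Int) (arr : List Int) (hn : n ≤ (arr.length : Int)) :
    ∀ (fuel : Nat) (i cm : Int), 0 ≤ i → (n - i).toNat ≤ fuel →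
    pvWhileA n k arr fuel i cm = cm + pvRS k ((arr.take n.toNat).drop i.toNat) := by
  intro fuel
  induction fuel with
  | zero =>
    intro i cm hi hf
    have hlen : (arr.take n.toNat).length ≤ i.toNat := by
      rw [List.length_take]; omega
    rw [List.drop_eq_nil_of_le hlen]
    simp [pvWhileA, pvRS]
  | succ f ih =>
    intro i cm hi hf
    by_cases hin : i ≥ n
    · have hlen : (arr.take n.toNat).length ≤ i.toNat := by
        rw [List.length_take]; omega
      rw [List.drop_eq_nil_of_le hlen]
      simp [pvWhileA, hin, pvRS]
    · push_neg at hin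
      have hiN : i.toNat < arr.length := by omega
      have hget : PySem.List.pyGetD arr i 0 = arr[i.toNat] :=
        PySem.List.pyGetD_eq_getElem arr 0 hi (by omega)
      have hlt : i.toNat < (arr.take n.toNat).length := by
        rw [List.length_take]; omega
      have hdrop : (arr.take n.toNat).drop i.toNat
          = arr[i.toNat] :: (arr.take n.toNat).drop (i.toNat + 1) := by
        rw [List.drop_eq_getElem_cons hlt, List.getElem_take]
      rw [pvWhileA, hget, hdrop]
      by_cases hk : arr[i.toNat] > k
      · simp [hin.not_ge, hk, pvRS]
      · have hrec := ih (i + 1) (cm + arr[i.toNat]) (by omega) (by omega)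
        have h1 : (i + 1).toNat = i.toNat + 1 := by omega
        rw [h1] at hrec
        simp only [hin.not_ge, hk, or_self, if_false, hrec, pvRS]
        ring

-- A equals the structural max-of-suffix-run-sums on the first n elements
theorem pvA_eq (n k : Int) (arr : List Int) (hn : n ≤ (arr.length : Int)) (hpos : 0 ≤ n) :
    max_Books n k arr = pvMS k (arr.take n.toNat) := by
  unfold max_Books
  rw [PySem.List.foldl_congr_mem _ _
    (fun acc i => max acc (pvRS k ((arr.take n.toNat).drop i.toNat))) 0
    (by
      intro acc i hmem
      rw [PySem.List.mem_pyRange_one] at hmem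
      rw [pvWhileA_eq n k arr hn n.toNat i 0 hmem.1 (by omega), zero_add])]
  rw [PySem.List.pyRange_zero, List.foldl_map]
  simp only [Int.toNat_natCast]
  have hlen : (arr.take n.toNat).length = n.toNat := by
    rw [List.length_take]; omega
  rw [show List.range n.toNat = List.range (arr.take n.toNat).length from by rw [hlen]]
  exact pvA_ref k (arr.take n.toNat)

-- B's foldr computes the pair (max suffix-run sum, run sum)
theorem pvB_foldr (k : Int) (xs : List Int) :
    xs.foldr (fun x (p : Int × Int) =>
      let cur := if x > k then 0 else x + p.2
      (if cur > p.1 then cur else p.1, cur)) ((0 : Int), (0 : Int))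
      = (pvMS k xs, pvRS k xs) := by
  induction xs with
  | nil => simp [pvMS, pvRS]
  | cons x t ih =>
    rw [List.foldr_cons, ih]
    show (_, _) = (_, _)
    have hmax : (if (if x > k then 0 else x + pvRS k t) > pvMS k t
        then (if x > k then 0 else x + pvRS k t) else pvMS k t)
        = max (pvMS k t) (if x > k then 0 else x + pvRS k t) := by
      rw [max_def]
      split_ifs <;> omega
    simp only [pvMS, pvRS, hmax]

-- reading the first m elements of arr through pyGetD yields arr.take m
theorem pvMapGet (arr : List Int) (m : Nat) (hm : m ≤ arr.length) :
    (List.range m).map (fun j : Nat => PySem.List.pyGetD arr (j : Int) 0) = arr.take m := by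
  apply List.ext_getElem
  · simp [hm]
  · intro j h1 h2
    simp only [List.getElem_map, List.getElem_range, List.getElem_take]
    have hj : j < arr.length := by
      simp at h2; omega
    rw [PySem.List.pyGetD_natCast, List.getD_eq_getElem arr 0 hj]

-- B equals the structural max-of-suffix-run-sums on the first n elements
theorem pvB_eq (n k : Int) (arr : List Int) (hn : n ≤ (arr.length : Int)) (hpos : 0 ≤ n) :
    max_Books_alt n k arr = pvMS k (arr.take n.toNat) := by
  unfold max_Books_alt
  rw [PySem.List.pyRange_neg_one_eq_reverse]
  have h1 : (-1 : Int) + 1 = 0 := by norm_num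
  have h2 : n - 1 + 1 = n := by ring
  have hfold : ∀ l : List Nat,
      l.foldr (fun (j : Nat) (p : Int × Int) =>
        let x := PySem.List.pyGetD arr (j : Int) 0
        let cur := if x > k then 0 else x + p.2
        (if cur > p.1 then cur else p.1, cur)) ((0 : Int), (0 : Int))
      = (l.map (fun j : Nat => PySem.List.pyGetD arr (j : Int) 0)).foldr
        (fun x (p : Int × Int) =>
          let cur := if x > k then 0 else x + p.2
          (if cur > p.1 then cur else p.1, cur)) ((0 : Int), (0 : Int)) := by
    intro l; simp only [List.foldr_map]
  rw [h1, h2, List.foldl_reverse, PySem.List.pyRange_zero, List.foldr_map, hfold,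
    pvMapGet arr n.toNat (by omega), pvB_foldr]

-- ===== VERDICT (by name: the statement is the Claim_ definition above) =====
theorem max_Books_spec : Claim_equal_max_Books := by
  intro n k arr _ hpre
  unfold Spec_max_Books
  by_cases hpos : 0 ≤ n
  · rw [pvA_eq n k arr hpre hpos, pvB_eq n k arr hpre hpos]
  · unfold max_Books max_Books_alt
    rw [PySem.List.pyRange_one_eq_nil (by omega),
      PySem.List.pyRange_neg_one_eq_nil (by omega)]
    rfl
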